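-- pv_equiv track=rewrite | github.com/zero0205/Algorithm_Python | 코테/2022 라인 플러스/old/5.py | solution
-- ===== SOURCE A (Python) =====
-- import heapq
--
-- def solution(abilities, k):
--     answer = 0
--     r = (len(abilities) + 1) // 2   # 라운드 수
--     if len(abilities) % 2 == 1:
--         abilities.append(0)
--     abilities.sort(reverse=True)
--     gap = []
--     for i in range(r):
--         heapq.heappush(gap,(-(abilities[2 * i] - abilities[2 * i + 1]), i))
--     priority = [False] * r
--     for j in range(k):
--         temp = heapq.heappop(gap)
--         priority[temp[1]] = True
--
--     for idx in range(r):
--         if priority[idx]:   # 우선권 사용 라운드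
--             answer += abilities[idx * 2]
--         else:
--             answer += abilities[idx * 2 + 1]
--     return answer
-- ===== SOURCE B (Python) =====
-- def solution(abilities, k):
--     # Same in-place mutation as A: pad to even length, sort descending.
--     if len(abilities) % 2 == 1:
--         abilities.append(0)
--     abilities.sort(reverse=True)
--     r = len(abilities) // 2
--     base = sum(abilities[2 * i + 1] for i in range(r))
--     gaps = sorted((abilities[2 * i] - abilities[2 * i + 1] for i in range(r)), reverse=True)
--     answer = base
--     for j in range(k):
--         answer += gaps[j]
--     return answer
-- ===== Notes on version B (the rewrite author's own statement) =====
-- stated objective: simpler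
-- what changed: B drops A's heap-of-(negated-gap, round) simulation and the priority boolean array: it computes the base sum of each pair's lower element once, sorts the pair gaps descending, and adds the first k gaps directly.
import Mathlib
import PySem

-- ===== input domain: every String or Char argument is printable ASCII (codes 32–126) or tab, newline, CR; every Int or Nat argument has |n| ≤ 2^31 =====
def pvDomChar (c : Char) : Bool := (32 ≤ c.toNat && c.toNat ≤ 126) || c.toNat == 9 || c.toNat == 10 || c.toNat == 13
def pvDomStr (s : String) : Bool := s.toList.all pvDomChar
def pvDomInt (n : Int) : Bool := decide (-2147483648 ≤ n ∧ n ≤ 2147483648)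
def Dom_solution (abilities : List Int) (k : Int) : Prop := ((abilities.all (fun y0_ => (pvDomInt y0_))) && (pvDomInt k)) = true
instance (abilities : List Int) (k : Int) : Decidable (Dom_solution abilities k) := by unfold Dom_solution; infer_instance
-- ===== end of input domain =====

-- B replaces A's heap/priority-array simulation by base sum + descending-sorted gaps, adding the
-- first k gaps directly; equal return value on Pre_ (A mutates `abilities` in place — the
-- equivalence proved here is about the return value; B performs the same mutation in Python).

-- ===== PORT A =====
-- heapq modelled as a list kept in sorted (Python tuple-lexicographic) order: exact for this use,
-- since every push precedes every pop and all pushed pairs have distinct second components, so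
-- heappop returns the unique minimum, i.e. pops come out in increasing lexicographic order.
def lexLt (p q : Int × Int) : Bool := decide (p.1 < q.1 ∨ (p.1 = q.1 ∧ p.2 < q.2))

def heapPush (h : List (Int × Int)) (x : Int × Int) : List (Int × Int) :=
  PySem.List.insertBy lexLt x h

-- heappop on an empty heap raises IndexError in Python: that happens exactly when k > r,
-- which Pre_solution excludes; the default value is never reached inside Pre_.
def heapPop (h : List (Int × Int)) : (Int × Int) × List (Int × Int) :=
  match h with
  | [] => ((0, 0), [])
  | x :: t => (x, t)

def solution (abilities : List Int) (k : Int) : Int :=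
  let answer : Int := 0
  let r : Nat := (abilities.length + 1) / 2          -- (len+1)//2 on a nonnegative int
  let abilities := if abilities.length % 2 == 1 then abilities ++ [0] else abilities
  let abilities := PySem.List.sorted abilities (fun x => x) true
  let gap : List (Int × Int) := (List.range r).foldl (fun h (i : Nat) =>
    heapPush h (-(PySem.List.pyGetD abilities (2 * (i : Int)) 0
                  - PySem.List.pyGetD abilities (2 * (i : Int) + 1) 0), (i : Int))) []
  let st := (PySem.List.pyRange 0 k 1).foldl
    (fun (s : List (Int × Int) × List Bool) _j =>
      let temp := heapPop s.1
      (temp.2, s.2.set temp.1.2.toNat true))           -- priority[temp[1]] = True (index always in range)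
    (gap, PySem.List.pyRepeat [false] (r : Int))
  let priority := st.2
  (List.range r).foldl (fun ans (idx : Nat) =>
    if priority.getD idx false then ans + PySem.List.pyGetD abilities ((idx : Int) * 2) 0
    else ans + PySem.List.pyGetD abilities ((idx : Int) * 2 + 1) 0) answer

-- ===== PORT B =====
def solution_alt (abilities : List Int) (k : Int) : Int :=
  let abilities := if abilities.length % 2 == 1 then abilities ++ [0] else abilities
  let abilities := PySem.List.sorted abilities (fun x => x) true
  let r : Nat := abilities.length / 2
  let base : Int := ((List.range r).map (fun (i : Nat) => PySem.List.pyGetD abilities (2 * (i : Int) + 1) 0)).sum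
  let gaps : List Int := (List.range r).map (fun (i : Nat) =>
    PySem.List.pyGetD abilities (2 * (i : Int)) 0 - PySem.List.pyGetD abilities (2 * (i : Int) + 1) 0)
  let gapsSorted := PySem.List.sorted gaps (fun x => x) true
  (PySem.List.pyRange 0 k 1).foldl (fun ans j => ans + PySem.List.pyGetD gapsSorted j 0) base

-- ===== PRECONDITION & SPEC =====
-- Pre_ excludes exactly k > (len+1)//2, where A's heappop (and B's gaps[j]) raises IndexError.
def Pre_solution (abilities : List Int) (k : Int) : Prop :=
  k ≤ (((abilities.length + 1) / 2 : Nat) : Int)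
instance (abilities : List Int) (k : Int) : Decidable (Pre_solution abilities k) := by
  unfold Pre_solution; infer_instance

def pvWitness_solution : List Int × Int := ([5, 1, 4, 2, 3], 2)

def Spec_solution (abilities : List Int) (k : Int) (out : Int) : Prop := out = solution_alt abilities k
instance (abilities : List Int) (k : Int) (out : Int) : Decidable (Spec_solution abilities k out) := by
  unfold Spec_solution; infer_instance

-- ===== CLAIM (what is proved, stated in full; the proofs are below) =====
def Claim_equal_solution : Prop := ∀ (abilities : List Int) (k : Int), Dom_solution abilities k → Pre_solution abilities k → Spec_solution abilities k (solution abilities k)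

-- ===== LEMMAS AND PROOFS =====

-- Abstract pieces of both programs, used only by the proofs.
def lexLe (p q : Int × Int) : Prop := p.1 < q.1 ∨ (p.1 = q.1 ∧ p.2 ≤ q.2)

def popStep (s : List (Int × Int) × List Bool) : List (Int × Int) × List Bool :=
  let temp := heapPop s.1
  (temp.2, s.2.set temp.1.2.toNat true)

def mark (l : List (Int × Int)) (pr : List Bool) : List Bool :=
  l.foldl (fun pr p => pr.set p.2.toNat true) pr

lemma insertBy_perm_cons (b : Int × Int → Int × Int → Bool) (x : Int × Int) (ys : List (Int × Int)) :
    (PySem.List.insertBy b x ys).Perm (x :: ys) := by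
  induction ys with
  | nil => simp [PySem.List.insertBy]
  | cons y t ih =>
    simp only [PySem.List.insertBy]
    split
    · exact List.Perm.refl _
    · exact (ih.cons y).trans (List.Perm.swap x y t)

lemma insertBy_pairwise (x : Int × Int) (ys : List (Int × Int)) (h : ys.Pairwise lexLe) :
    (PySem.List.insertBy lexLt x ys).Pairwise lexLe := by
  induction ys with
  | nil => simp [PySem.List.insertBy, lexLe]
  | cons y t ih =>
    rcases List.pairwise_cons.1 h with ⟨hy, ht⟩
    simp only [PySem.List.insertBy]
    split
    · rename_i hlt
      simp only [lexLt, decide_eq_true_eq] at hlt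
      refine List.pairwise_cons.2 ⟨?_, h⟩
      intro z hz
      rcases List.mem_cons.1 hz with rfl | hz
      · simp only [lexLe]; omega
      · have := hy z hz
        simp only [lexLe] at *; omega
    · rename_i hnlt
      simp only [lexLt, decide_eq_true_eq] at hnlt
      push Not at hnlt
      refine List.pairwise_cons.2 ⟨?_, ih ht⟩
      intro z hz
      rcases (PySem.List.mem_insertBy _ _ _ _).1 hz with rfl | hz
      · simp only [lexLe]; omega
      · exact hy z hz

lemma foldl_heapPush (l : List (Int × Int)) : ∀ (acc : List (Int × Int)), acc.Pairwise lexLe →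
    (l.foldl (fun h x => heapPush h x) acc).Pairwise lexLe ∧
    (l.foldl (fun h x => heapPush h x) acc).Perm (acc ++ l) := by
  induction l with
  | nil =>
    intro acc h
    simp only [List.foldl_nil, List.append_nil]
    exact ⟨h, List.Perm.refl _⟩
  | cons x t ih =>
    intro acc hacc
    simp only [List.foldl_cons]
    rcases ih (heapPush acc x) (insertBy_pairwise x acc hacc) with ⟨h1, h2⟩
    refine ⟨h1, h2.trans ?_⟩
    have h3 : (heapPush acc x ++ t).Perm ((x :: acc) ++ t) :=
      (insertBy_perm_cons lexLt x acc).append_right t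
    exact h3.trans List.perm_middle.symm

lemma foldl_const {α β : Type} (f : α → α) (l : List β) (init : α) :
    l.foldl (fun s _ => f s) init = f^[l.length] init := by
  induction l generalizing init with
  | nil => rfl
  | cons x t ih => simp [ih, Function.iterate_succ_apply]

lemma popIter_spec (n : Nat) : ∀ (H : List (Int × Int)) (pr : List Bool), n ≤ H.length →
    popStep^[n] (H, pr) = (H.drop n, mark (H.take n) pr) := by
  induction n with
  | zero => intro H pr _; simp [mark]
  | succ m ih =>
    intro H pr hn
    cases H with
    | nil => simp at hn
    | cons p t =>
      rw [Function.iterate_succ_apply]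
      have : popStep (p :: t, pr) = (t, pr.set p.2.toNat true) := rfl
      rw [this, ih t _ (by simpa using hn)]
      simp [mark]

lemma mark_getD (l : List (Int × Int)) : ∀ (pr : List Bool) (idx : Nat),
    (∀ p ∈ l, ∃ j : Nat, p.2 = (j : Int) ∧ j < pr.length) →
    (mark l pr).getD idx false = (pr.getD idx false || l.any (fun p => p.2 == (idx : Int))) := by
  induction l with
  | nil => intro pr idx _; simp [mark]
  | cons p t ih =>
    intro pr idx hl
    obtain ⟨j, hj2, hjlen⟩ := hl p (by simp)
    have hm : mark (p :: t) pr = mark t (pr.set p.2.toNat true) := rfl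
    rw [hm, ih (pr.set p.2.toNat true) idx (by
      intro q hq
      obtain ⟨j', h1, h2⟩ := hl q (by simp [hq])
      exact ⟨j', h1, by simpa using h2⟩)]
    have hset : (pr.set p.2.toNat true).getD idx false
        = if idx = j then true else pr.getD idx false := by
      rw [hj2]
      simp only [Int.toNat_natCast]
      rcases eq_or_ne idx j with rfl | hne
      · simp [List.getD, hjlen]
      · simp [List.getD, hne, Ne.symm hne]
    rw [hset]
    have hbeq : (p.2 == (idx : Int)) = decide (idx = j) := by
      rw [hj2]; rcases eq_or_ne idx j with rfl | hne
      · simp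
      · simp [hne, Ne.symm hne]
    simp only [List.any_cons, hbeq]
    rcases eq_or_ne idx j with rfl | hne
    · simp
    · simp [hne]

lemma range_sum_diff (f f' : Nat → Int) (r i : Nat) (hi : i < r)
    (hagree : ∀ x < r, x ≠ i → f x = f' x) :
    ((List.range r).map f).sum = ((List.range r).map f').sum + (f i - f' i) := by
  have h1 : ((List.range r).map f).sum = ∑ x ∈ Finset.range r, f x := rfl
  have h2 : ((List.range r).map f').sum = ∑ x ∈ Finset.range r, f' x := rfl
  rw [h1, h2]
  have h4 : ∑ x ∈ Finset.range r, (f x - f' x)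
      = ∑ x ∈ Finset.range r, f x - ∑ x ∈ Finset.range r, f' x := Finset.sum_sub_distrib f f'
  have h3 : ∑ x ∈ Finset.range r, (f x - f' x) = f i - f' i := by
    apply Finset.sum_eq_single_of_mem i (Finset.mem_range.2 hi)
    intro b hb hne
    rw [hagree b (Finset.mem_range.1 hb) hne]; ring
  omega

lemma sum_sel (a : List Int) (r : Nat) (l : List (Int × Int))
    (hshape : ∀ p ∈ l, ∃ i : Nat, i < r ∧ p = (-(a.getD (2*i) 0 - a.getD (2*i+1) 0), (i : Int)))
    (hnd : (l.map Prod.snd).Nodup) :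
    ((List.range r).map (fun (idx : Nat) =>
        if l.any (fun p => p.2 == (idx : Int)) then a.getD (2*idx) 0 else a.getD (2*idx+1) 0)).sum
      = ((List.range r).map (fun (idx : Nat) => a.getD (2*idx+1) 0)).sum + (l.map (fun p => -p.1)).sum := by
  induction l with
  | nil => simp
  | cons p t ih =>
    obtain ⟨i, hir, hp⟩ := hshape p (by simp)
    rw [List.map_cons] at hnd
    have hnotin : ((i : Int)) ∉ t.map Prod.snd := by
      have := (List.nodup_cons.1 hnd).1
      simpa [hp] using this
    have hndt : (t.map Prod.snd).Nodup := (List.nodup_cons.1 hnd).2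
    have ihs := ih (fun q hq => hshape q (by simp [hq])) hndt
    have htani : t.any (fun p => p.2 == (i : Int)) = false := by
      rw [List.any_eq_false]
      intro q hq
      simp only [beq_iff_eq]
      intro hq2
      exact hnotin (by rw [← hq2]; exact List.mem_map_of_mem hq)
    have hpi : (p.2 == (i : Int)) = true := by rw [hp]; simp
    have key := range_sum_diff
      (fun (idx : Nat) => if (p.2 == (idx : Int) || t.any (fun p => p.2 == (idx : Int)))
          then a.getD (2*idx) 0 else a.getD (2*idx+1) 0)
      (fun (idx : Nat) => if t.any (fun p => p.2 == (idx : Int))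
          then a.getD (2*idx) 0 else a.getD (2*idx+1) 0)
      r i hir ?_
    · simp only [hpi, htani, Bool.true_or, Bool.false_eq_true, if_true, if_false] at key
      simp only [List.any_cons, List.map_cons, List.sum_cons]
      have hneg : -p.1 = a.getD (2*i) 0 - a.getD (2*i+1) 0 := by rw [hp]; simp
      exact key.trans (by rw [ihs, hneg]; ring)
    · intro x hxr hxi
      have hpx : (p.2 == (x : Int)) = false := by
        rw [hp]
        simp only [beq_eq_false_iff_ne, ne_eq]
        exact_mod_cast fun h => hxi (by exact_mod_cast h.symm)
      simp only [hpx, Bool.false_or]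

lemma foldl_range_getD_sum (gs : List Int) (n : Nat) (hn : n ≤ gs.length) (b : Int) :
    (List.range n).foldl (fun acc j => acc + gs.getD j 0) b = b + (gs.take n).sum := by
  induction n with
  | zero => simp
  | succ m ih =>
    rw [List.range_succ, List.foldl_append, ih (by omega)]
    simp only [List.foldl_cons, List.foldl_nil]
    rw [List.sum_take_succ gs m (by omega), List.getD_eq_getElem gs 0 (by omega)]
    ring

-- ===== VERDICT (by name: the statement is the Claim_ definition above) =====
theorem solution_spec : Claim_equal_solution := by
  intro abilities k _hdom hpre
  unfold Pre_solution at hpre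
  unfold Spec_solution
  -- shared names
  set r : Nat := (abilities.length + 1) / 2 with hrdef
  set pad : List Int := if abilities.length % 2 == 1 then abilities ++ [0] else abilities with hpaddef
  set a : List Int := PySem.List.sorted pad (fun x => x) true with hadef
  have hlen_pad : pad.length = 2 * r := by
    rw [hpaddef]
    by_cases h : abilities.length % 2 = 1 <;> simp [h] <;> omega
  have hlen_a : a.length = 2 * r := by
    rw [hadef, PySem.List.length_sorted, hlen_pad]
  -- index normalisation
  have hA2 : ∀ i : Nat, PySem.List.pyGetD a (2 * (i : Int)) 0 = a.getD (2 * i) 0 := by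
    intro i
    rw [show (2 * (i : Int)) = ((2 * i : Nat) : Int) by push_cast; ring, PySem.List.pyGetD_natCast]
  have hA1 : ∀ i : Nat, PySem.List.pyGetD a (2 * (i : Int) + 1) 0 = a.getD (2 * i + 1) 0 := by
    intro i
    rw [show (2 * (i : Int) + 1) = ((2 * i + 1 : Nat) : Int) by push_cast; ring,
      PySem.List.pyGetD_natCast]
  have hB2 : ∀ i : Nat, PySem.List.pyGetD a ((i : Int) * 2) 0 = a.getD (2 * i) 0 := by
    intro i
    rw [show ((i : Int) * 2) = ((2 * i : Nat) : Int) by push_cast; ring, PySem.List.pyGetD_natCast]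
  have hB1 : ∀ i : Nat, PySem.List.pyGetD a ((i : Int) * 2 + 1) 0 = a.getD (2 * i + 1) 0 := by
    intro i
    rw [show ((i : Int) * 2 + 1) = ((2 * i + 1 : Nat) : Int) by push_cast; ring,
      PySem.List.pyGetD_natCast]
  -- the pushed pairs and the heap after all pushes
  set g : Nat → Int := fun i => a.getD (2 * i) 0 - a.getD (2 * i + 1) 0 with hgdef
  set P : List (Int × Int) := (List.range r).map (fun i => (-(g i), (i : Int))) with hPdef
  set H : List (Int × Int) := P.foldl (fun h x => heapPush h x) [] with hHdef
  obtain ⟨hHpair, hHperm⟩ := foldl_heapPush P [] (by simp)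
  rw [List.nil_append] at hHperm
  rw [← hHdef] at hHpair hHperm
  have hHlen : H.length = r := by rw [hHperm.length_eq, hPdef]; simp
  set n : Nat := k.toNat with hndef
  have hn : n ≤ r := by omega
  have hshapeH : ∀ p ∈ H, ∃ i : Nat, i < r ∧ p = (-(g i), (i : Int)) := by
    intro p hp
    have := hHperm.mem_iff.1 hp
    rw [hPdef] at this
    obtain ⟨i, hi, rfl⟩ := List.mem_map.1 this
    exact ⟨i, List.mem_range.1 hi, rfl⟩
  have hndH : ((H.take n).map Prod.snd).Nodup := by
    have h1 : (P.map Prod.snd).Nodup := by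
      rw [hPdef, List.map_map]
      have : (Prod.snd ∘ fun i : Nat => (-(g i), (i : Int))) = fun i : Nat => (i : Int) := rfl
      rw [this]
      exact List.nodup_range.map (fun a b h => by exact_mod_cast h)
    have h2 : (H.map Prod.snd).Nodup := ((hHperm.map Prod.snd).nodup_iff).2 h1
    rw [List.map_take]
    exact List.Nodup.sublist (List.take_sublist n _) h2
  -- ===== A's value =====
  have hApr : solution abilities k
      = ((List.range r).map (fun (idx : Nat) => a.getD (2 * idx + 1) 0)).sum
        + ((H.take n).map (fun p => -p.1)).sum := by
    rw [solution]
    simp only [← hrdef, ← hpaddef, ← hadef, hA2, hA1]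
    rw [show ((List.range r).foldl (fun h i =>
        heapPush h (-(a.getD (2 * i) 0 - a.getD (2 * i + 1) 0), (i : Int))) []) = H by
      rw [hHdef, hPdef, List.foldl_map]]
    rw [show PySem.List.pyRepeat [false] (r : Int) = List.replicate r false by
      rw [PySem.List.pyRepeat_singleton]; simp]
    have hfc := foldl_const popStep (PySem.List.pyRange 0 k 1) (H, List.replicate r false)
    rw [PySem.List.length_pyRange_one, show ((k : Int) - 0).toNat = n by omega] at hfc
    rw [show (List.foldl (fun (s : List (Int × Int) × List Bool) (_j : Int) =>
          ((heapPop s.1).2, s.2.set (heapPop s.1).1.2.toNat true))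
          (H, List.replicate r false) (PySem.List.pyRange 0 k 1))
        = popStep^[n] (H, List.replicate r false) from hfc,
      popIter_spec n H (List.replicate r false) (by omega)]
    have hpr : ∀ idx : Nat, (mark (H.take n) (List.replicate r false)).getD idx false
        = (H.take n).any (fun p => p.2 == (idx : Int)) := by
      intro idx
      rw [mark_getD (H.take n) (List.replicate r false) idx (by
        intro p hp
        obtain ⟨i, hi, rfl⟩ := hshapeH p (List.take_subset n H hp)
        exact ⟨i, rfl, by simpa using hi⟩)]
      rcases Nat.lt_or_ge idx r with h | h
      · rw [List.getD_replicate false h]; simp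
      · rw [List.getD_eq_default]
        · simp
        · simpa using h
    simp only [hpr, hB2, hB1]
    rw [show (fun (ans : Int) (idx : Nat) =>
        if (H.take n).any (fun p => p.2 == (idx : Int)) then ans + a.getD (2 * idx) 0
        else ans + a.getD (2 * idx + 1) 0)
      = fun (ans : Int) (idx : Nat) => ans +
        (if (H.take n).any (fun p => p.2 == (idx : Int)) then a.getD (2 * idx) 0
         else a.getD (2 * idx + 1) 0) by funext ans idx; split <;> rfl]
    rw [PySem.List.foldl_add]
    rw [sum_sel a r (H.take n) (fun p hp => hshapeH p (List.take_subset n H hp)) hndH]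
    ring
  -- ===== B's value =====
  have hgs : PySem.List.sorted ((List.range r).map g) (fun x => x) true
      = H.map (fun (p : Int × Int) => -p.1) := by
    have hPmap : P.map (fun (p : Int × Int) => -p.1) = (List.range r).map g := by
      rw [hPdef, List.map_map]
      simp
    refine List.Perm.eq_of_pairwise (le := fun x y : Int => y ≤ x)
      (fun a b _ _ h1 h2 => le_antisymm h2 h1) ?_ ?_ ?_
    · exact PySem.List.sorted_pairwise_rev _ _
    · exact List.Pairwise.map (fun (p : Int × Int) => -p.1)
        (fun p q hpq => by dsimp only; rcases hpq with h | ⟨h1, h2⟩ <;> omega) hHpair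
    · refine (PySem.List.sorted_perm _ _ _).trans ?_
      have := hHperm.map (fun (p : Int × Int) => -p.1)
      rw [hPmap] at this
      exact this.symm
  have hB : solution_alt abilities k
      = ((List.range r).map (fun (idx : Nat) => a.getD (2 * idx + 1) 0)).sum
        + ((H.take n).map (fun p => -p.1)).sum := by
    rw [solution_alt]
    simp only [← hpaddef, ← hadef, hA2, hA1, hlen_a,
      show 2 * r / 2 = r by omega, ← hgdef]
    rw [hgs, PySem.List.pyRange_one]
    simp only [zero_add, Int.sub_zero, List.foldl_map, PySem.List.pyGetD_natCast, ← hndef]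
    rw [foldl_range_getD_sum _ n (by rw [List.length_map, hHlen]; omega)]
    rw [← List.map_take]
  rw [hApr, hB]
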